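-- pv_equiv track=rewrite | github.com/yalatif0210/ldc_prod | pilot_bot/formatters/telegram_formatter.py | fmt_late_structures
-- ===== SOURCE A (Python) =====
-- def _sep(char: str = "━", length: int = 32) -> str:
--     return char * length
--
-- def _paginate(items: list, chunk: int) -> list[list]:
--     """Découpe une liste en sous-listes de taille 'chunk'."""
--     return [items[i : i + chunk] for i in range(0, len(items), chunk)]
--
-- def fmt_header(title: str, icon: str = "") -> str:
--     """Titre en gras avec séparateur ━."""
--     prefix = f"{icon} " if icon else ""
--     return f"<b>{prefix}{title}</b>\n{_sep()}\n"
--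
-- def fmt_late_structures(rows: list, period_label: str) -> list[str]:
--     """
--     rows = [{'structure': str, 'district': str, 'region': str}]
--     Retourne list[str] — paginé par 20.
--     Si vide : message succès "Aucun retard".
--     """
--     header = fmt_header(f"Structures en retard — {period_label}", "⏰")
--
--     if not rows:
--         return [header + "\n✅ <b>Aucun retard !</b> Toutes les structures ont soumis leur rapport."]
--
--     pages = _paginate(rows, 20)
--     total = len(rows)
--     messages = []
--
--     for page_idx, page in enumerate(pages, start=1):
--         page_header = header
--         if len(pages) > 1:
--             page_header += f"<i>Page {page_idx}/{len(pages)} — {total} structures</i>\n\n"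
--         else:
--             page_header += f"<i>{total} structure(s) en retard</i>\n\n"
--
--         items = []
--         start_num = (page_idx - 1) * 20 + 1
--         for i, row in enumerate(page, start=start_num):
--             structure = row.get("structure", "—")
--             district = row.get("district", "—")
--             region = row.get("region", "—")
--             items.append(f"{i}. <b>{structure}</b>\n   📍 {district} / {region}")
--
--         messages.append(page_header + "\n".join(items))
--
--     return messages
-- ===== SOURCE B (Python) =====
-- DASH = '\u2014'
--
-- def fmt_late_structures(rows: list, period_label: str) -> list[str]:
--     header = f"<b>\u23f0 Structures en retard \u2014 {period_label}</b>\n" + "\u2501" * 32 + "\n"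
--
--     if not rows:
--         return [header + "\n\u2705 <b>Aucun retard !</b> Toutes les structures ont soumis leur rapport."]
--
--     total = len(rows)
--     n_pages = -(-total // 20)
--     messages = []
--     for i, row in enumerate(rows):
--         item = (f"{i + 1}. <b>{row.get('structure', DASH)}</b>\n"
--                 f"   \U0001f4cd {row.get('district', DASH)} / {row.get('region', DASH)}")
--         if i % 20 == 0:
--             if n_pages > 1:
--                 sub = f"<i>Page {i // 20 + 1}/{n_pages} \u2014 {total} structures</i>\n\n"
--             else:
--                 sub = f"<i>{total} structure(s) en retard</i>\n\n"
--             messages.append(header + sub + item)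
--         else:
--             messages[-1] += "\n" + item
--     return messages
-- ===== Notes on version B (the rewrite author's own statement) =====
-- stated objective: alternative
-- what changed: B replaces A's paginate-then-format-pages structure with a single streaming pass over the rows: no pagination step and no per-page item list exist; each row either opens a new message (when its 0-based index is a multiple of 20, attaching the header and subtitle computed from ceil(total/20)) or is concatenated onto the last message in place.
import Mathlib
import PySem

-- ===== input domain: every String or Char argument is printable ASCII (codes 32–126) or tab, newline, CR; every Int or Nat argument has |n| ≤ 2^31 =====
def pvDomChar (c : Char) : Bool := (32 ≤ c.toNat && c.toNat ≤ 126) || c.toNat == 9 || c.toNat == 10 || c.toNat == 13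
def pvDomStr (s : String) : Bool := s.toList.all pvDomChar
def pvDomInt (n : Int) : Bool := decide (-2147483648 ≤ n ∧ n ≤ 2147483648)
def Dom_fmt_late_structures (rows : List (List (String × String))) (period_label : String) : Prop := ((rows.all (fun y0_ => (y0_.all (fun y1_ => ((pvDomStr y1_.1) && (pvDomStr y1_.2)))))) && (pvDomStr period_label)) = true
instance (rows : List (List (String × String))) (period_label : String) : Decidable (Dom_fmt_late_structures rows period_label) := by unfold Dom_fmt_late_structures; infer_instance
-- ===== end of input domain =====

-- B replaces A's paginate-then-format structure by a single streaming pass over the rows: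
-- each row either opens a new message (index multiple of 20) or is appended to the last one
-- in place; same return value (objective: alternative decomposition).

-- ===== PORT A =====
def pvSep (ch : String) (length : Int) : String :=
  String.ofList (PySem.List.pyRepeat ch.toList length)  -- hand port of Python "str * int": repeats the characters (exact)

def pvFmtHeader (title : String) (icon : String) : String :=
  let prefix_ := if icon == "" then "" else icon ++ " "
  "<b>" ++ prefix_ ++ title ++ "</b>\n" ++ pvSep "━" 32 ++ "\n"

def pvPaginate {α : Type} (items : List α) (chunk : Int) : List (List α) :=
  (PySem.List.pyRange 0 (PySem.List.len items) chunk).map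
    (fun i => PySem.List.slice items (some i) (some (i + chunk)))

def fmt_late_structures (rows : List (List (String × String))) (period_label : String) : List String :=
  let header := pvFmtHeader ("Structures en retard — " ++ period_label) "⏰"
  if rows = [] then
    [header ++ "\n✅ <b>Aucun retard !</b> Toutes les structures ont soumis leur rapport."]
  else
    let pages := pvPaginate rows 20
    let total := PySem.List.len rows
    (PySem.List.enumerate pages 1).foldl (fun messages pp =>
      let page_header := header ++
        (if PySem.List.len pages > 1 then
          "<i>Page " ++ PySem.Int.toStr pp.1 ++ "/" ++ PySem.Int.toStr (PySem.List.len pages) ++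
            " — " ++ PySem.Int.toStr total ++ " structures</i>\n\n"
         else
          "<i>" ++ PySem.Int.toStr total ++ " structure(s) en retard</i>\n\n")
      let start_num := (pp.1 - 1) * 20 + 1
      let items := (PySem.List.enumerate pp.2 start_num).foldl (fun its ir =>
        its ++ [PySem.Int.toStr ir.1 ++ ". <b>" ++
          PySem.Dict.getD (PySem.Dict.ofList ir.2) "structure" "—" ++ "</b>\n   📍 " ++
          PySem.Dict.getD (PySem.Dict.ofList ir.2) "district" "—" ++ " / " ++
          PySem.Dict.getD (PySem.Dict.ofList ir.2) "region" "—"]) []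
      messages ++ [page_header ++ PySem.Str.join "\n" items]) []

-- ===== PORT B =====
-- the body of B's loop, named so the proofs can speak about it
def pvStepB (header : String) (total n_pages : Int)
    (messages : List String) (ir : Int × List (String × String)) : List String :=
  let item := PySem.Int.toStr (ir.1 + 1) ++ ". <b>" ++
    PySem.Dict.getD (PySem.Dict.ofList ir.2) "structure" "—" ++ "</b>\n   📍 " ++
    PySem.Dict.getD (PySem.Dict.ofList ir.2) "district" "—" ++ " / " ++
    PySem.Dict.getD (PySem.Dict.ofList ir.2) "region" "—"
  if PySem.Int.mod ir.1 20 == 0 then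
    let sub := if n_pages > 1 then
        "<i>Page " ++ PySem.Int.toStr (PySem.Int.floordiv ir.1 20 + 1) ++ "/" ++
          PySem.Int.toStr n_pages ++ " — " ++ PySem.Int.toStr total ++ " structures</i>\n\n"
      else
        "<i>" ++ PySem.Int.toStr total ++ " structure(s) en retard</i>\n\n"
    messages ++ [header ++ sub ++ item]
  else
    -- messages[-1] += "\n" + item
    messages.dropLast ++ [messages.getLastD "" ++ ("\n" ++ item)]

def fmt_late_structures_alt (rows : List (List (String × String))) (period_label : String) : List String :=
  let header := "<b>⏰ Structures en retard — " ++ period_label ++ "</b>\n" ++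
    String.ofList (PySem.List.pyRepeat "━".toList 32) ++ "\n"
  if rows = [] then
    [header ++ "\n✅ <b>Aucun retard !</b> Toutes les structures ont soumis leur rapport."]
  else
    let total := PySem.List.len rows
    let n_pages := -(PySem.Int.floordiv (-total) 20)   -- -(-total // 20) = ceil(total/20)
    (PySem.List.enumerate rows 0).foldl (pvStepB header total n_pages) []

-- ===== PRECONDITION & SPEC =====
def Spec_fmt_late_structures (rows : List (List (String × String))) (period_label : String) (out : List String) : Prop := out = fmt_late_structures_alt rows period_label
instance (rows : List (List (String × String))) (period_label : String) (out : List String) : Decidable (Spec_fmt_late_structures rows period_label out) := by unfold Spec_fmt_late_structures; infer_instance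

-- ===== CLAIM (what is proved, stated in full; the proofs are below) =====
def Claim_equal_fmt_late_structures : Prop := ∀ (rows : List (List (String × String))) (period_label : String), Dom_fmt_late_structures rows period_label → Spec_fmt_late_structures rows period_label (fmt_late_structures rows period_label)

-- ===== LEMMAS AND PROOFS =====

-- canonical page description both ports are reduced to
def pvHeaderS (pl : String) : String :=
  "<b>⏰ Structures en retard — " ++ pl ++ "</b>\n" ++
    String.ofList (PySem.List.pyRepeat "━".toList 32) ++ "\n"

def pvItemStr (num : Int) (row : List (String × String)) : String :=
  PySem.Int.toStr num ++ ". <b>" ++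
    PySem.Dict.getD (PySem.Dict.ofList row) "structure" "—" ++ "</b>\n   📍 " ++
    PySem.Dict.getD (PySem.Dict.ofList row) "district" "—" ++ " / " ++
    PySem.Dict.getD (PySem.Dict.ofList row) "region" "—"

def pvSub (P total k : Int) : String :=
  if P > 1 then
    "<i>Page " ++ PySem.Int.toStr (k + 1) ++ "/" ++ PySem.Int.toStr P ++
      " — " ++ PySem.Int.toStr total ++ " structures</i>\n\n"
  else
    "<i>" ++ PySem.Int.toStr total ++ " structure(s) en retard</i>\n\n"

def pvMsg (pl : String) (P total : Int) (chunk : List (List (String × String))) (k : Int) : String :=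
  pvHeaderS pl ++ pvSub P total k ++
    PySem.Str.join "\n" ((PySem.List.enumerate chunk (20 * k + 1)).map (fun ir => pvItemStr ir.1 ir.2))

-- the tail of a message as B grows it (index i is 0-based; item carries i+1)
def pvTail (i : Int) : List (List (String × String)) → String
  | [] => ""
  | r :: rest => ("\n" ++ pvItemStr (i + 1) r) ++ pvTail (i + 1) rest

def pvCanon (pl : String) (P total : Int) (rows : List (List (String × String))) : List String :=
  (List.range ((rows.length + 19) / 20)).map
    (fun k => pvMsg pl P total ((rows.drop (20 * k)).take 20) (k : Int))

lemma pv_header_eq (pl : String) :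
    pvFmtHeader ("Structures en retard — " ++ pl) "⏰" = pvHeaderS pl := by
  apply String.toList_injective
  simp only [pvFmtHeader, pvSep, pvHeaderS]
  rw [if_neg (by decide)]
  simp only [String.toList_append, String.toList_ofList, ← List.append_assoc]
  congr 4

lemma pv_npages_eq (n : Nat) :
    -(PySem.Int.floordiv (-(n : Int)) 20) = (((n + 19) / 20 : Nat) : Int) := by
  rw [show PySem.Int.floordiv (-(n : Int)) 20 = (-(n : Int)) / 20 from
    PySem.Int.floordiv_eq_ediv_of_pos (by norm_num)]
  omega

lemma pv_paginate_eq (rows : List (List (String × String))) (h : rows ≠ []) :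
    pvPaginate rows 20 =
      (List.range ((rows.length + 19) / 20)).map (fun k => (rows.drop (20 * k)).take 20) := by
  have hn : 0 < rows.length := List.length_pos_of_ne_nil h
  unfold pvPaginate
  rw [PySem.List.pyRange_of_pos 0 _ (by norm_num)]
  simp only [PySem.List.len_eq, List.map_map]
  rw [if_pos (by exact_mod_cast hn)]
  have hc : (((rows.length : Int) - 0 + 20 - 1) / 20).toNat = (rows.length + 19) / 20 := by
    omega
  rw [hc]
  apply List.map_congr_left
  intro k _
  simp only [Function.comp]
  rw [show (0 + 20 * (k : Int)) = ((20 * k : Nat) : Int) by push_cast; ring,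
      show (((20 * k : Nat) : Int) + 20) = ((20 * k + 20 : Nat) : Int) by push_cast; ring,
      PySem.List.slice_natCast]
  congr 1
  omega

-- joining the chunk's items equals the first item followed by the grown tail
lemma pv_join_cons (rest : List (List (String × String))) (n : Int) (r : List (String × String)) :
    PySem.Str.join "\n" ((PySem.List.enumerate (r :: rest) n).map (fun ir => pvItemStr ir.1 ir.2)) =
      pvItemStr n r ++ pvTail n rest := by
  induction rest generalizing n r with
  | nil =>
    apply String.toList_injective
    simp [PySem.Str.toList_join, PySem.List.enumerate_cons, PySem.List.enumerate_nil,
      PySem.Chars.join_singleton, pvTail]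
  | cons r2 rest' ih =>
    apply String.toList_injective
    have h2 := congrArg String.toList (ih (n + 1) r2)
    simp only [PySem.Str.toList_join, String.toList_append, PySem.List.enumerate_cons,
      List.map_cons] at h2 ⊢
    simp only [PySem.Chars.join_cons_cons]
    rw [h2]
    simp [pvTail, List.append_assoc]

-- A equals the canonical page list
lemma pvA_eq_canon (rows : List (List (String × String))) (pl : String) (h : rows ≠ []) :
    fmt_late_structures rows pl =
      pvCanon pl (((rows.length + 19) / 20 : Nat) : Int) (rows.length : Int) rows := by
  unfold fmt_late_structures pvCanon
  simp only [if_neg h, pv_header_eq]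
  rw [PySem.List.foldl_append_singleton_eq_map]
  simp only [List.nil_append]
  rw [pv_paginate_eq rows h]
  apply List.ext_getElem
  · simp [PySem.List.length_enumerate]
  · intro k h1 h2
    simp only [List.getElem_map, PySem.List.getElem_enumerate, List.getElem_range]
    rw [PySem.List.foldl_append_singleton_eq_map]
    simp only [List.nil_append, PySem.List.len_eq, List.length_map, List.length_range]
    rw [show ((1 : Int) + (k : Int) - 1) * 20 + 1 = 20 * (k : Int) + 1 by ring,
        show (1 : Int) + (k : Int) = (k : Int) + 1 by ring]
    simp [pvMsg, pvHeaderS, pvSub, pvItemStr]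

-- B's loop body never sees an empty message list after the first row; growing the last
-- message over a run of non-multiple-of-20 indices appends the tail string
lemma pvB_tail (hdr : String) (total P : Int) (c : List (List (String × String)))
    (s : Int) (acc : List String) (m : String)
    (hmod : ∀ j : Nat, j < c.length → PySem.Int.mod (s + j) 20 ≠ 0) :
    (PySem.List.enumerate c s).foldl (pvStepB hdr total P) (acc ++ [m]) =
      acc ++ [m ++ pvTail s c] := by
  induction c generalizing s acc m with
  | nil =>
    have he : m ++ pvTail s [] = m := String.toList_injective (by simp [pvTail])
    simp [PySem.List.enumerate_nil, he]
  | cons r rest ih =>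
    have h0 : PySem.Int.mod s 20 ≠ 0 := by simpa using hmod 0 (by simp)
    rw [PySem.List.enumerate_cons, List.foldl_cons]
    have h0' : ¬ ((20 : Int) ∣ s) := fun hd => h0 ((PySem.Int.mod_eq_zero_iff_dvd s 20).mpr hd)
    have hstep : pvStepB hdr total P (acc ++ [m]) (s, r) =
        acc ++ [m ++ ("\n" ++ pvItemStr (s + 1) r)] := by
      unfold pvStepB
      simp [h0', pvItemStr]
    rw [hstep, ih (s + 1) acc (m ++ ("\n" ++ pvItemStr (s + 1) r))
      (by intro j hj
          have := hmod (j + 1) (by simpa using Nat.succ_lt_succ hj)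
          rw [show s + 1 + (j : Int) = s + ((j : Nat) + 1 : Nat) by push_cast; ring]
          exact this)]
    simp [pvTail, String.append_assoc]

-- one chunk (≤ 20 rows, start index a multiple of 20) appends exactly one message
lemma pvB_chunk (hdr : String) (total P : Int) (c : List (List (String × String)))
    (k : Nat) (acc : List String) (hne : c ≠ []) (hle : c.length ≤ 20) :
    (PySem.List.enumerate c (20 * (k : Int))).foldl (pvStepB hdr total P) acc =
      acc ++ [hdr ++ pvSub P total (k : Int) ++
        PySem.Str.join "\n" ((PySem.List.enumerate c (20 * (k : Int) + 1)).map
          (fun ir => pvItemStr ir.1 ir.2))] := by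
  cases c with
  | nil => exact absurd rfl hne
  | cons r rest =>
    rw [PySem.List.enumerate_cons, List.foldl_cons]
    have hstep : pvStepB hdr total P acc (20 * (k : Int), r) =
        acc ++ [hdr ++ pvSub P total (k : Int) ++ pvItemStr (20 * (k : Int) + 1) r] := by
      unfold pvStepB pvSub pvItemStr
      simp
    rw [hstep, pvB_tail hdr total P rest (20 * (k : Int) + 1) acc
      (hdr ++ pvSub P total (k : Int) ++ pvItemStr (20 * (k : Int) + 1) r) ?hm]
    case hm =>
      intro j hj
      have h19 : j ≤ 18 := by
        have h20 := hle
        simp only [List.length_cons] at h20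
        omega
      rw [PySem.Int.mod_eq_emod_of_pos (by norm_num)]
      omega
    rw [pv_join_cons]
    simp [String.append_assoc]

-- the whole loop produces the canonical page list
set_option maxHeartbeats 1000000 in
lemma pvB_main (hdr : String) (total P : Int) :
    ∀ (n : Nat) (c : List (List (String × String))) (k : Nat) (acc : List String),
      (c.length + 19) / 20 = n →
      (PySem.List.enumerate c (20 * (k : Int))).foldl (pvStepB hdr total P) acc =
        acc ++ (List.range n).map (fun j =>
          hdr ++ pvSub P total ((k + j : Nat) : Int) ++
            PySem.Str.join "\n" ((PySem.List.enumerate ((c.drop (20 * j)).take 20)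
              (20 * ((k + j : Nat) : Int) + 1)).map (fun ir => pvItemStr ir.1 ir.2))) := by
  intro n
  induction n with
  | zero =>
    intro c k acc hn
    have hc : c = [] := by
      have : c.length = 0 := by omega
      exact List.length_eq_zero_iff.mp this
    subst hc
    simp [PySem.List.enumerate_nil]
  | succ n ih =>
    intro c k acc hn
    have hpos : 0 < c.length := by omega
    have hne : c ≠ [] := by
      intro hc; rw [hc] at hpos; simp at hpos
    by_cases hlen : c.length ≤ 20
    · have hn0 : n = 0 := by omega
      subst hn0
      rw [pvB_chunk hdr total P c k acc hne hlen]
      simp [List.take_of_length_le hlen]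
    · rw [not_le] at hlen
      conv_lhs => rw [← List.take_append_drop 20 c]
      rw [PySem.List.enumerate_append, List.foldl_append]
      have htk : (c.take 20).length = 20 := by
        rw [List.length_take]; omega
      rw [pvB_chunk hdr total P (c.take 20) k _
        (by intro hc; have := congrArg List.length hc; simp [htk] at this) (le_of_eq htk)]
      rw [htk, show 20 * (k : Int) + (20 : Nat) = 20 * ((k + 1 : Nat) : Int) by push_cast; ring]
      rw [ih (c.drop 20) (k + 1) _ (by rw [List.length_drop]; omega)]
      rw [List.append_assoc]
      congr 1
      simp only [List.range_succ_eq_map, List.map_cons, List.map_map]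
      refine congrArg₂ List.cons ?_ ?_
      · simp
      · apply List.map_congr_left
        intro j hj
        simp only [Function.comp]
        rw [List.drop_drop, show 20 + 20 * j = 20 * j.succ by omega,
            show k + 1 + j = k + j.succ by omega]

lemma pvB_eq_canon (rows : List (List (String × String))) (pl : String) (h : rows ≠ []) :
    fmt_late_structures_alt rows pl =
      pvCanon pl (((rows.length + 19) / 20 : Nat) : Int) (rows.length : Int) rows := by
  unfold fmt_late_structures_alt pvCanon
  simp only [if_neg h, PySem.List.len_eq]
  rw [pv_npages_eq rows.length]
  rw [show (0 : Int) = 20 * ((0 : Nat) : Int) by simp]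
  rw [pvB_main _ _ _ ((rows.length + 19) / 20) rows 0 [] rfl]
  simp [pvMsg, pvHeaderS]

-- ===== VERDICT (by name: the statement is the Claim_ definition above) =====
theorem fmt_late_structures_spec : Claim_equal_fmt_late_structures := by
  intro rows pl _
  unfold Spec_fmt_late_structures
  by_cases h : rows = []
  · subst h
    unfold fmt_late_structures fmt_late_structures_alt
    simp [pv_header_eq, pvHeaderS]
  · rw [pvA_eq_canon rows pl h, pvB_eq_canon rows pl h]
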